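-- pv_equiv track=rewrite | github.com/CStrimbei/python | lab2/lab2-homework.py | spectators
-- ===== SOURCE A (Python) =====
-- def spectators(matrix):
--     result = []
--     for i in range(0, len(matrix[0])):
--         max = matrix[0][i]
--         for j in range(1, len(matrix)):
--             if matrix[j][i] > max:
--                 max = matrix[j][i]
--             else:
--                 result.append((j, i))
--     return result
-- ===== SOURCE B (Python) =====
-- def spectators(matrix):
--     result = []
--     for i in range(len(matrix[0])):
--         col = [row[i] for row in matrix]
--         pref = []
--         m = None
--         for v in col:
--             if m is None or v > m:
--                 m = v
--             pref.append(m)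
--         for j, (v, m) in enumerate(zip(col[1:], pref), 1):
--             if v <= m:
--                 result.append((j, i))
--     return result
-- ===== Notes on version B (the rewrite author's own statement) =====
-- stated objective: alternative
-- what changed: Per column, B first materialises the whole column and its prefix-maxima list in one pass, then a separate zip/enumerate pass emits the (j,i) pairs, replacing A's single index-driven loop with an in-line running max.
-- outside the precondition, e.g. on spectators([]): A raises IndexError, B raises IndexError; on spectators([[1, 2], [3]]): A raises IndexError, B raises IndexError
import Mathlib
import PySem

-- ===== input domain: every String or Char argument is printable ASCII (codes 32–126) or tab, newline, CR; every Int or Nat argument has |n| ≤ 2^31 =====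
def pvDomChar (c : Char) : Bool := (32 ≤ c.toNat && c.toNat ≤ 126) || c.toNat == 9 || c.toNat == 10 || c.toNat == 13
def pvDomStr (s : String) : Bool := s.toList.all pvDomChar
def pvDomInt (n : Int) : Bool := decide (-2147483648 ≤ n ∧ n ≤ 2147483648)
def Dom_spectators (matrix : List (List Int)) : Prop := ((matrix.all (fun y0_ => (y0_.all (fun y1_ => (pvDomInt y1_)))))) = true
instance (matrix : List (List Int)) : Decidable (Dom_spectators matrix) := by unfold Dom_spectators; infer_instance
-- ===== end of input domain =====

-- B replaces A's single pass with a running max by a per-column prefix-maxima list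
-- built first and then compared element-by-element (objective: alternative decomposition,
-- same asymptotic cost).

-- ===== PORT A =====
def spectators (matrix : List (List Int)) : List (Int × Int) :=
  (PySem.List.pyRange 0 (PySem.List.len (PySem.List.pyGetD matrix 0 ([] : List Int))) 1).foldl
    (fun result i =>
      ((PySem.List.pyRange 1 (PySem.List.len matrix) 1).foldl
        (fun (p : List (Int × Int) × Int) j =>
          if PySem.List.pyGetD (PySem.List.pyGetD matrix j ([] : List Int)) i 0 > p.2 then
            (p.1, PySem.List.pyGetD (PySem.List.pyGetD matrix j ([] : List Int)) i 0)
          else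
            (p.1 ++ [(j, i)], p.2))
        (result, PySem.List.pyGetD (PySem.List.pyGetD matrix 0 ([] : List Int)) i 0)).1)
    []

-- ===== PORT B =====
def spectators_alt (matrix : List (List Int)) : List (Int × Int) :=
  (PySem.List.pyRange 0 (PySem.List.len (PySem.List.pyGetD matrix 0 ([] : List Int))) 1).foldl
    (fun result i =>
      let col : List Int := matrix.map (fun row => PySem.List.pyGetD row i 0)
      let pref : List Int :=
        (col.foldl
          (fun (p : List Int × Option Int) v =>
            let m : Int := match p.2 with
              | none => v
              | some m0 => if v > m0 then v else m0
            (p.1 ++ [m], some m))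
          ([], none)).1
      (PySem.List.enumerate ((PySem.List.slice col (some 1) none).zip pref) 1).foldl
        (fun res e => if e.2.1 ≤ e.2.2 then res ++ [(e.1, i)] else res)
        result)
    []

-- ===== PRECONDITION & SPEC =====
-- Pre_ excludes exactly the inputs on which the Python A raises IndexError:
-- the empty matrix (matrix[0]) and matrices with a row shorter than the first row.
def Pre_spectators (matrix : List (List Int)) : Prop :=
  matrix ≠ [] ∧ ∀ row ∈ matrix, (matrix.headD []).length ≤ row.length
instance (matrix : List (List Int)) : Decidable (Pre_spectators matrix) := by
  unfold Pre_spectators; infer_instance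
def pvWitness_spectators : List (List Int) := [[1, 2], [3, 1]]

def Spec_spectators (matrix : List (List Int)) (out : List (Int × Int)) : Prop := out = spectators_alt matrix
instance (matrix : List (List Int)) (out : List (Int × Int)) : Decidable (Spec_spectators matrix out) := by unfold Spec_spectators; infer_instance

-- ===== CLAIM (what is proved, stated in full; the proofs are below) =====
def Claim_equal_spectators : Prop := ∀ (matrix : List (List Int)), Dom_spectators matrix → Pre_spectators matrix → Spec_spectators matrix (spectators matrix)

-- ===== LEMMAS AND PROOFS =====

-- prefix-maxima list of xs with running max m (tail of B's `pref`)
def pmList (m : Int) : List Int → List Int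
  | [] => []
  | x :: xs => (if x > m then x else m) :: pmList (if x > m then x else m) xs

-- B's pref-building fold computes acc ++ pmList m xs (once the state is `some m`)
theorem pref_fold_some (xs : List Int) : ∀ (acc : List Int) (m : Int),
    (xs.foldl
      (fun (p : List Int × Option Int) v =>
        (p.1 ++ [match p.2 with
                 | none => v
                 | some m0 => if v > m0 then v else m0],
         some (match p.2 with
               | none => v
               | some m0 => if v > m0 then v else m0)))
      (acc, some m)) = (acc ++ pmList m xs, some (((m :: pmList m xs).getLast (by simp)))) := by
  induction xs with
  | nil => intro acc m; simp [pmList]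
  | cons x xs ih =>
    intro acc m
    simp only [List.foldl_cons, pmList]
    rw [ih]
    simp [List.getLast_cons]

-- A's inner fold over range(1, len) reading (j, col'[j]) equals a structural fold over
-- enumerate of the part of col' past a prefix ys.
theorem foldl_pyRange_eq_enumerate {S : Type} (G : S → Int → Int → S) :
    ∀ (xs ys : List Int) (s : S),
    (PySem.List.pyRange (ys.length : Int) ((ys.length : Int) + (xs.length : Int)) 1).foldl
      (fun acc j => G acc j (PySem.List.pyGetD (ys ++ xs) j 0)) s
    = (PySem.List.enumerate xs (ys.length : Int)).foldl (fun acc e => G acc e.1 e.2) s := by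
  intro xs
  induction xs with
  | nil => intro ys s; simp [PySem.List.pyRange_one_eq_nil, PySem.List.enumerate]
  | cons x xr ih =>
    intro ys s
    rw [PySem.List.pyRange_one_cons (by push_cast [List.length_cons]; omega)]
    simp only [List.foldl_cons, PySem.List.enumerate_cons]
    have hget : PySem.List.pyGetD (ys ++ x :: xr) (ys.length : Int) 0 = x := by
      rw [PySem.List.pyGetD_natCast]
      simp
    rw [hget]
    have := ih (ys ++ [x]) (G s (ys.length : Int) x)
    simp only [List.length_append, List.length_cons, List.length_nil] at this ⊢
    have harr : ((ys.length : Int) + 1 : Int) = ((ys.length + 1 : Nat) : Int) := by push_cast; ring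
    have harr2 : ((ys.length : Int) + (xr.length + 1 : Nat) : Int)
        = (((ys.length + 1 : Nat) : Int) + (xr.length : Int)) := by push_cast; ring
    rw [harr2, harr]
    rw [show ys ++ x :: xr = (ys ++ [x]) ++ xr by simp]
    exact this

-- core per-column fact: A's running-max fold equals B's zip-with-prefix-maxima fold
theorem inner_core (i : Int) : ∀ (xs : List Int) (m : Int) (a : Int) (res : List (Int × Int)),
    ((PySem.List.enumerate xs a).foldl
      (fun (p : List (Int × Int) × Int) e =>
        if e.2 > p.2 then (p.1, e.2) else (p.1 ++ [(e.1, i)], p.2)) (res, m)).1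
    = (PySem.List.enumerate (xs.zip (m :: pmList m xs)) a).foldl
        (fun r e => if e.2.1 ≤ e.2.2 then r ++ [(e.1, i)] else r) res := by
  intro xs
  induction xs with
  | nil => intro m a res; simp [PySem.List.enumerate]
  | cons x xr ih =>
    intro m a res
    simp only [pmList, List.zip_cons_cons, PySem.List.enumerate_cons, List.foldl_cons]
    by_cases h : x > m
    · rw [if_pos h, if_neg (by omega), if_pos h]
      exact ih x (a + 1) res
    · rw [if_neg h, if_pos (by omega), if_neg h]
      exact ih m (a + 1) (res ++ [(a, i)])

-- the two per-column loop bodies agree on every matrix and column index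
theorem body_eq (matrix : List (List Int)) (i : Int) (result : List (Int × Int)) :
    ((PySem.List.pyRange 1 (PySem.List.len matrix) 1).foldl
      (fun (p : List (Int × Int) × Int) j =>
        if PySem.List.pyGetD (PySem.List.pyGetD matrix j ([] : List Int)) i 0 > p.2 then
          (p.1, PySem.List.pyGetD (PySem.List.pyGetD matrix j ([] : List Int)) i 0)
        else
          (p.1 ++ [(j, i)], p.2))
      (result, PySem.List.pyGetD (PySem.List.pyGetD matrix 0 ([] : List Int)) i 0)).1
    =
    (let col : List Int := matrix.map (fun row => PySem.List.pyGetD row i 0)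
     let pref : List Int :=
        (col.foldl
          (fun (p : List Int × Option Int) v =>
            let m : Int := match p.2 with
              | none => v
              | some m0 => if v > m0 then v else m0
            (p.1 ++ [m], some m))
          ([], none)).1
     (PySem.List.enumerate ((PySem.List.slice col (some 1) none).zip pref) 1).foldl
        (fun res e => if e.2.1 ≤ e.2.2 then res ++ [(e.1, i)] else res)
        result) := by
  -- reading matrix[j][i] is reading col[j]
  have hcomm : ∀ j : Int,
      PySem.List.pyGetD (PySem.List.pyGetD matrix j ([] : List Int)) i 0
      = PySem.List.pyGetD (matrix.map (fun row => PySem.List.pyGetD row i 0)) j 0 := by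
    intro j
    have h0 : PySem.List.pyGetD ([] : List Int) i 0 = 0 := by simp [PySem.List.pyGetD, PySem.List.pyGet?]
    calc PySem.List.pyGetD (PySem.List.pyGetD matrix j ([] : List Int)) i 0
        = PySem.List.pyGetD (matrix.map (fun row => PySem.List.pyGetD row i 0)) j
            (PySem.List.pyGetD ([] : List Int) i 0) :=
          (PySem.List.pyGetD_map (f := fun row => PySem.List.pyGetD row i 0) matrix j ([] : List Int)).symm
      _ = PySem.List.pyGetD (matrix.map (fun row => PySem.List.pyGetD row i 0)) j 0 := by rw [h0]
  cases matrix with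
  | nil =>
    simp [PySem.List.pyRange_one_eq_nil, PySem.List.len]
  | cons r0 rs =>
    set col := (r0 :: rs).map (fun row => PySem.List.pyGetD row i 0) with hcol
    obtain ⟨v0, rest, hvr⟩ : ∃ v0 rest, col = v0 :: rest := ⟨_, _, rfl⟩
    simp only [hcomm]
    -- init max is col[0] = v0
    have h0 : PySem.List.pyGetD col 0 0 = v0 := by
      rw [hvr]; simp [PySem.List.pyGetD_zero_cons]
    -- pref
    have hpref :
        (col.foldl
          (fun (p : List Int × Option Int) v =>
            let m : Int := match p.2 with
              | none => v
              | some m0 => if v > m0 then v else m0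
            (p.1 ++ [m], some m))
          ([], none)).1 = v0 :: pmList v0 rest := by
      rw [hvr]
      simp only [List.foldl_cons, List.nil_append]
      rw [pref_fold_some rest [v0] v0]
      simp
    simp only [hpref]
    -- A side: turn the range fold into an enumerate fold over rest
    have hlen : PySem.List.len ((r0 :: rs) : List (List Int)) = (1 : Int) + (rest.length : Int) := by
      have : col.length = rest.length + 1 := by rw [hvr]; simp
      simp only [PySem.List.len_eq]
      have : ((r0 :: rs) : List (List Int)).length = col.length := by rw [hcol]; simp
      omega
    rw [h0, hlen]
    have hA := foldl_pyRange_eq_enumerate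
      (G := fun (p : List (Int × Int) × Int) (j : Int) (v : Int) =>
        if v > p.2 then (p.1, v) else (p.1 ++ [(j, i)], p.2))
      rest [v0] (result, v0)
    norm_num at hA
    rw [hvr]
    rw [hA]
    -- B side: slice col 1 = rest
    rw [PySem.List.slice_from_one]
    simp only [List.tail_cons]
    exact inner_core i rest v0 1 result

-- ===== VERDICT (by name: the statement is the Claim_ definition above) =====
theorem spectators_spec : Claim_equal_spectators := by
  intro matrix _ _
  unfold Spec_spectators spectators spectators_alt
  apply PySem.List.foldl_congr_mem
  intro res i _
  exact body_eq matrix i res
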